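-- pv_equiv track=rewrite | github.com/rybycy/lastfm-obsessions | lastfm-earworms-to-spotify.py | find_consecutive_repeats
-- ===== SOURCE A (Python) =====
-- def find_consecutive_repeats(scrobbles, min_repeats=3):
--     repeat_counts = {}
--     count = 1
--     prev_track = None
--
--     for s in scrobbles:
--         track = (s['artist'], s['title'])
--         if track == prev_track:
--             count += 1
--         else:
--             if prev_track and count >= min_repeats:
--                 repeat_counts[prev_track] = max(repeat_counts.get(prev_track, 0), count)
--             count = 1
--         prev_track = track
--
--     if prev_track and count >= min_repeats:
--         repeat_counts[prev_track] = max(repeat_counts.get(prev_track, 0), count)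
--
--     return sorted(repeat_counts.items(), key=lambda x: x[1], reverse=True)
-- ===== SOURCE B (Python) =====
-- def find_consecutive_repeats(scrobbles, min_repeats=3):
--     # Divide and conquer: the run summary of a segment is computed by recursively
--     # splitting it in half and merging the two halves' summaries at the boundary.
--     def merge(l, r):
--         if l and r and l[-1][0] == r[0][0]:
--             return l[:-1] + [(l[-1][0], l[-1][1] + r[0][1])] + r[1:]
--         return l + r
--
--     def runs(lo, hi):  # run summary of scrobbles[lo:hi], requires hi > lo
--         if hi - lo == 1:
--             s = scrobbles[lo]
--             return [((s['artist'], s['title']), 1)]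
--         mid = (lo + hi) // 2
--         return merge(runs(lo, mid), runs(mid, hi))
--
--     repeat_counts = {}
--     for track, length in (runs(0, len(scrobbles)) if scrobbles else []):
--         if length >= min_repeats and length > repeat_counts.get(track, 0):
--             repeat_counts[track] = length
--     return sorted(repeat_counts.items(), key=lambda x: x[1], reverse=True)
-- ===== Notes on version B (the rewrite author's own statement) =====
-- stated objective: alternative
-- what changed: Replaces A's single-pass prev/count state machine (with a duplicated end-of-stream flush) by a divide-and-conquer: recursively split the scrobble list in half, compute each half's run summary, merge the summaries at the boundary, then keep the longest qualifying run per track.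
import Mathlib
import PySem

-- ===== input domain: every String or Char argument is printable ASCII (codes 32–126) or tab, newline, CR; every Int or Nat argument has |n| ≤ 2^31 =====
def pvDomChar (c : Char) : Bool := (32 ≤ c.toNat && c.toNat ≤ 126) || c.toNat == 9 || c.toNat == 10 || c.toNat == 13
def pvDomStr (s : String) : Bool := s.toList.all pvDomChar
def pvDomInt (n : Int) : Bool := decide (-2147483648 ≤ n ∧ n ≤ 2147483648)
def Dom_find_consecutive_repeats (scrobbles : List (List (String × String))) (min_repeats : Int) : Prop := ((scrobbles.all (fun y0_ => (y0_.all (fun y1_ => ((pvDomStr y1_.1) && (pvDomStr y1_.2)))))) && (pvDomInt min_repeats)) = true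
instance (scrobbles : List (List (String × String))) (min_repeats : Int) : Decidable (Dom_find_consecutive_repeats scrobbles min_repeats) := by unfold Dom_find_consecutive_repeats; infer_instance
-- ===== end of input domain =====

-- B replaces A's streaming prev/count state machine by a divide-and-conquer (recursively halve
-- the scrobble list, merge the halves' run summaries, then pick the best qualifying run per
-- track); objective: alternative algorithm, equivalence of the return value is what is proved.

-- shared accessor for s['artist'] / s['title']; Pre_ guarantees both keys are present
-- (the .getD "" default is never reached inside Pre_)
def fcrTrack (s : List (String × String)) : String × String :=
  ((List.lookup "artist" s).getD "", (List.lookup "title" s).getD "")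

-- ===== PORT A =====
-- the 'if prev_track and count >= min_repeats: repeat_counts[prev_track] = max(...)' block
-- (a 2-tuple of strings is always truthy, so 'prev_track' is exactly 'prev ≠ none')
def fcrFlush (min_repeats : Int) (rc : PySem.Dict (String × String) Int) (count : Int)
    (prev : Option (String × String)) : PySem.Dict (String × String) Int :=
  match prev with
  | some p => if min_repeats ≤ count then rc.insert p (max (rc.getD p 0) count) else rc
  | none => rc

-- one iteration of A's for-loop over the state (repeat_counts, count, prev_track)
def fcrStepA (min_repeats : Int)
    (st : PySem.Dict (String × String) Int × Int × Option (String × String))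
    (s : List (String × String)) :
    PySem.Dict (String × String) Int × Int × Option (String × String) :=
  let track := fcrTrack s
  match st with
  | (rc, count, prev) =>
    if some track = prev then (rc, count + 1, some track)
    else (fcrFlush min_repeats rc count prev, 1, some track)

def find_consecutive_repeats (scrobbles : List (List (String × String))) (min_repeats : Int) :
    List ((String × String) × Int) :=
  let st := scrobbles.foldl (fcrStepA min_repeats) (PySem.Dict.empty, 1, none)
  PySem.List.sorted (fcrFlush min_repeats st.1 st.2.1 st.2.2).items (fun x => x.2) true

-- ===== PORT B =====
-- 'merge(l, r)': join two adjacent run summaries, fusing the boundary runs if same track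
def fcrMerge (l r : List ((String × String) × Int)) : List ((String × String) × Int) :=
  match l.getLast?, r with
  | some la, rf :: rt =>
      if la.1 = rf.1 then l.dropLast ++ [(la.1, la.2 + rf.2)] ++ rt else l ++ r
  | _, _ => l ++ r

-- 'runs(lo, hi)': segments are represented directly as sublists (runs(lo,mid)/runs(mid,hi)
-- are the two halves, so a segment of length n splits at n // 2); [] is the top-level
-- 'if scrobbles else []' guard — Python's runs is never called on an empty segment
def fcrRuns : List (List (String × String)) → List ((String × String) × Int)
  | [] => []
  | [s] => [(fcrTrack s, 1)]
  | a :: b :: t =>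
      fcrMerge (fcrRuns ((a :: b :: t).take ((a :: b :: t).length / 2)))
               (fcrRuns ((a :: b :: t).drop ((a :: b :: t).length / 2)))
termination_by xs => xs.length
decreasing_by
  · simp only [List.length_take, List.length_cons]; omega
  · simp only [List.length_drop, List.length_cons]; omega

-- the per-track best-qualifying-run fold over the run summary
def fcrBest (min_repeats : Int) (rc : PySem.Dict (String × String) Int)
    (kr : (String × String) × Int) : PySem.Dict (String × String) Int :=
  if min_repeats ≤ kr.2 ∧ rc.getD kr.1 0 < kr.2 then rc.insert kr.1 kr.2 else rc

def find_consecutive_repeats_alt (scrobbles : List (List (String × String))) (min_repeats : Int) :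
    List ((String × String) × Int) :=
  let rc := (fcrRuns scrobbles).foldl (fcrBest min_repeats) PySem.Dict.empty
  PySem.List.sorted rc.items (fun x => x.2) true

-- ===== PRECONDITION & SPEC =====
-- Pre_ excludes exactly the scrobbles lacking an 'artist' or 'title' key, on which Python A
-- raises KeyError.
def Pre_find_consecutive_repeats (scrobbles : List (List (String × String))) (min_repeats : Int) : Prop :=
  scrobbles.all (fun s => (List.lookup "artist" s).isSome && (List.lookup "title" s).isSome) = true
instance (scrobbles : List (List (String × String))) (min_repeats : Int) : Decidable (Pre_find_consecutive_repeats scrobbles min_repeats) := by unfold Pre_find_consecutive_repeats; infer_instance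

def pvWitness_find_consecutive_repeats : (List (List (String × String))) × Int :=
  ([[("artist", "a"), ("title", "t")]], 3)

def Spec_find_consecutive_repeats (scrobbles : List (List (String × String))) (min_repeats : Int) (out : List ((String × String) × Int)) : Prop := out = find_consecutive_repeats_alt scrobbles min_repeats
instance (scrobbles : List (List (String × String))) (min_repeats : Int) (out : List ((String × String) × Int)) : Decidable (Spec_find_consecutive_repeats scrobbles min_repeats out) := by unfold Spec_find_consecutive_repeats; infer_instance

-- ===== CLAIM (what is proved, stated in full; the proofs are below) =====
def Claim_equal_find_consecutive_repeats : Prop := ∀ (scrobbles : List (List (String × String))) (min_repeats : Int), Dom_find_consecutive_repeats scrobbles min_repeats → Pre_find_consecutive_repeats scrobbles min_repeats → Spec_find_consecutive_repeats scrobbles min_repeats (find_consecutive_repeats scrobbles min_repeats)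

-- ===== LEMMAS AND PROOFS =====

-- A's loop body, seen as appending a singleton run summary
def fcrRunStep (runs : List ((String × String) × Int)) (s : List (String × String)) :
    List ((String × String) × Int) :=
  fcrMerge runs [(fcrTrack s, 1)]

lemma fcrMerge_nil_right (l : List ((String × String) × Int)) : fcrMerge l [] = l := by
  unfold fcrMerge
  cases l.getLast? <;> simp

lemma fcrMerge_nil_left (r : List ((String × String) × Int)) : fcrMerge [] r = r := by
  unfold fcrMerge
  cases r <;> simp

-- evaluation lemmas for merge, and associativity when the middle summary is a single run
lemma fcrMerge_concat_cons (l' : List ((String × String) × Int)) (la rf : (String × String) × Int)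
    (rt : List ((String × String) × Int)) :
    fcrMerge (l' ++ [la]) (rf :: rt) =
      if la.1 = rf.1 then l' ++ [(la.1, la.2 + rf.2)] ++ rt else (l' ++ [la]) ++ rf :: rt := by
  unfold fcrMerge
  rw [List.getLast?_concat]
  simp

lemma fcrMerge_singleton_cons (a rf : (String × String) × Int)
    (rt : List ((String × String) × Int)) :
    fcrMerge [a] (rf :: rt) =
      if a.1 = rf.1 then (a.1, a.2 + rf.2) :: rt else a :: rf :: rt := by
  simpa using fcrMerge_concat_cons [] a rf rt

lemma fcrMerge_assoc_single (rs R : List ((String × String) × Int)) (k : String × String) (c : Int) :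
    fcrMerge (fcrMerge rs [(k, c)]) R = fcrMerge rs (fcrMerge [(k, c)] R) := by
  rcases List.eq_nil_or_concat rs with hrs | ⟨l', la, hrs⟩
  · subst hrs; rw [fcrMerge_nil_left, fcrMerge_nil_left]
  · subst hrs
    simp only [List.concat_eq_append]
    cases R with
    | nil => rw [fcrMerge_nil_right, fcrMerge_nil_right]
    | cons rf rt =>
      by_cases hla : la.1 = k <;> by_cases hrf : k = rf.1
      · simp [fcrMerge_concat_cons, fcrMerge_singleton_cons, hla, hrf, add_assoc]
      · simp [fcrMerge_concat_cons, fcrMerge_singleton_cons, hla, hrf]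
      · have h2 : ¬ la.1 = rf.1 := fun h => hla (h.trans hrf.symm)
        rw [show fcrMerge (l' ++ [la]) [(k, c)] = (l' ++ [la]) ++ [(k, c)] from by
              rw [fcrMerge_concat_cons]; simp [hla],
            fcrMerge_concat_cons (l' ++ [la]) (k, c) rf rt]
        simp [fcrMerge_concat_cons, fcrMerge_singleton_cons, hrf, h2]
      · rw [show fcrMerge (l' ++ [la]) [(k, c)] = (l' ++ [la]) ++ [(k, c)] from by
              rw [fcrMerge_concat_cons]; simp [hla],
            fcrMerge_concat_cons (l' ++ [la]) (k, c) rf rt]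
        simp [fcrMerge_concat_cons, fcrMerge_singleton_cons, hla, hrf]

-- folding A's body from any accumulated summary = merging with the fold from scratch
lemma fcr_foldl_runStep_merge (ys : List (List (String × String)))
    (rs : List ((String × String) × Int)) :
    ys.foldl fcrRunStep rs = fcrMerge rs (ys.foldl fcrRunStep []) := by
  induction ys generalizing rs with
  | nil => simp [fcrMerge_nil_right]
  | cons y t ih =>
    simp only [List.foldl_cons]
    rw [ih (fcrRunStep rs y), ih (fcrRunStep [] y)]
    unfold fcrRunStep
    rw [fcrMerge_nil_left, fcrMerge_assoc_single]

-- the divide-and-conquer summary equals the left fold of A's body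
lemma fcrRuns_eq (xs : List (List (String × String))) :
    fcrRuns xs = xs.foldl fcrRunStep [] := by
  induction xs using fcrRuns.induct with
  | case1 => simp [fcrRuns]
  | case2 s => simp [fcrRuns, fcrRunStep, fcrMerge]
  | case3 a b t ih1 ih2 =>
    rw [fcrRuns, ih1, ih2, ← fcr_foldl_runStep_merge, ← List.foldl_append,
        List.take_append_drop]

-- replacing the (unique) entry at key k by its own value leaves the association list unchanged
lemma fcr_assoc_map_noop (l : List ((String × String) × Int)) (k : String × String) (v : Int)
    (hnd : (l.map Prod.fst).Nodup)
    (hf : (l.find? (fun p => p.1 == k)).map Prod.snd = some v) :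
    l.map (fun p => if (p.1 == k) = true then (k, v) else p) = l := by
  induction l with
  | nil => simp at hf
  | cons p t ih =>
    simp only [List.map_cons, List.nodup_cons] at hnd
    by_cases hp : p.1 = k
    · rw [List.find?_cons_of_pos (by simp [hp])] at hf
      simp only [Option.map_some, Option.some.injEq] at hf
      have ht : t.map (fun p => if (p.1 == k) = true then (k, v) else p) = t := by
        conv_rhs => rw [← List.map_id t]
        apply List.map_congr_left
        intro q hq
        have hqk : q.1 ≠ k := by
          intro hqk
          exact hnd.1 (by rw [hp, ← hqk]; exact List.mem_map.mpr ⟨q, hq, rfl⟩)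
        simp [hqk]
      have hhead : (if (p.1 == k) = true then (k, v) else p) = p := by
        rw [if_pos (by simp [hp]), ← hf, ← hp]
      simp only [List.map_cons, ht, hhead]
    · rw [List.find?_cons_of_neg (by simp [hp])] at hf
      simp only [List.map_cons]
      rw [ih hnd.2 hf]
      simp [hp]

-- inserting a key with the value it already has is a no-op (on a dict with unique keys)
lemma fcr_insert_noop (d : PySem.Dict (String × String) Int) (k : String × String) (v : Int)
    (hnd : d.keys.Nodup) (hg : d.get? k = some v) : d.insert k v = d := by
  have hfind : (d.items.find? (fun p => p.1 == k)).map Prod.snd = some v := by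
    simpa [PySem.Dict.get?] using hg
  have hcont : d.contains k = true := by
    obtain ⟨pv, hpv⟩ : ∃ pv, d.items.find? (fun p => p.1 == k) = some pv := by
      cases h : d.items.find? (fun p => p.1 == k) with
      | none => rw [h] at hfind; simp at hfind
      | some pv => exact ⟨pv, rfl⟩
    have hmem := List.mem_of_find?_eq_some hpv
    have hk := List.find?_some hpv
    simp only [PySem.Dict.contains, List.any_eq_true]
    exact ⟨pv, hmem, hk⟩
  apply PySem.Dict.ext
  rw [PySem.Dict.items_insert_of_contains d v hcont]
  exact fcr_assoc_map_noop d.items k v (by simpa [PySem.Dict.keys] using hnd) hfind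

-- the aggregation dict built by the best-run fold always has distinct keys
lemma fcr_nodup_keys_foldl_best (min_repeats : Int) (runs : List ((String × String) × Int))
    (d : PySem.Dict (String × String) Int) (hnd : d.keys.Nodup) :
    (runs.foldl (fcrBest min_repeats) d).keys.Nodup := by
  induction runs generalizing d with
  | nil => exact hnd
  | cons r t ih =>
    simp only [List.foldl_cons]
    apply ih
    unfold fcrBest
    split
    · exact PySem.Dict.nodup_keys_insert d r.1 r.2 hnd
    · exact hnd

-- A's end-of-run flush computes exactly B's best-run step (for a positive run length)
lemma fcr_flush_eq_best (min_repeats : Int) (rc : PySem.Dict (String × String) Int)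
    (c : Int) (k : String × String) (hc : 1 ≤ c) (hnd : rc.keys.Nodup) :
    fcrFlush min_repeats rc c (some k) = fcrBest min_repeats rc (k, c) := by
  rw [show fcrFlush min_repeats rc c (some k)
        = if min_repeats ≤ c then rc.insert k (max (rc.getD k 0) c) else rc from rfl,
      show fcrBest min_repeats rc (k, c)
        = if min_repeats ≤ c ∧ rc.getD k 0 < c then rc.insert k c else rc from rfl]
  by_cases hm : min_repeats ≤ c
  · by_cases hlt : rc.getD k 0 < c
    · rw [if_pos hm, if_pos ⟨hm, hlt⟩, max_eq_right (le_of_lt hlt)]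
    · rw [if_pos hm, if_neg (by simp [hlt]), max_eq_left (le_of_not_gt hlt)]
      cases hg : rc.get? k with
      | none =>
        exfalso
        have : rc.getD k 0 = 0 := by simp [PySem.Dict.getD, hg]
        omega
      | some v =>
        have hv : rc.getD k 0 = v := by simp [PySem.Dict.getD, hg]
        rw [hv]
        exact fcr_insert_noop rc k v hnd hg
  · rw [if_neg hm, if_neg (by simp [hm])]

-- one fcrRunStep literally performs A's append-or-extend on the summary
lemma fcrRunStep_eval (rs : List ((String × String) × Int)) (s : List (String × String)) :
    fcrRunStep rs s =
      match rs.getLast? with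
      | some la => if la.1 = fcrTrack s then rs.dropLast ++ [(la.1, la.2 + 1)]
                   else rs ++ [(fcrTrack s, 1)]
      | none => [(fcrTrack s, 1)] := by
  unfold fcrRunStep fcrMerge
  cases h : rs.getLast? with
  | none => simp [List.getLast?_eq_none_iff.mp h]
  | some la => by_cases hk : la.1 = fcrTrack s <;> simp [hk]

-- main loop invariant: A's state after a prefix corresponds to the summary of that prefix
lemma fcr_main (min_repeats : Int) (xs : List (List (String × String)))
    (rc : PySem.Dict (String × String) Int) (c : Int) (prev : Option (String × String))
    (runs : List ((String × String) × Int))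
    (h : (prev = none ∧ runs = [] ∧ rc = PySem.Dict.empty ∧ c = 1) ∨
         (∃ k runs0, prev = some k ∧ 1 ≤ c ∧ runs = runs0 ++ [(k, c)] ∧
            rc = runs0.foldl (fcrBest min_repeats) PySem.Dict.empty)) :
    (fcrFlush min_repeats (xs.foldl (fcrStepA min_repeats) (rc, c, prev)).1
        (xs.foldl (fcrStepA min_repeats) (rc, c, prev)).2.1
        (xs.foldl (fcrStepA min_repeats) (rc, c, prev)).2.2) =
    (xs.foldl fcrRunStep runs).foldl (fcrBest min_repeats) PySem.Dict.empty := by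
  induction xs generalizing rc c prev runs with
  | nil =>
    simp only [List.foldl_nil]
    rcases h with ⟨hp, hr, hrc, _⟩ | ⟨k, runs0, hp, hc, hr, hrc⟩
    · subst hp hr hrc; rfl
    · subst hp hr hrc
      rw [List.foldl_append, List.foldl_cons, List.foldl_nil]
      exact fcr_flush_eq_best min_repeats _ c k hc
        (fcr_nodup_keys_foldl_best min_repeats runs0 _ PySem.Dict.nodup_keys_empty)
  | cons x xs ih =>
    simp only [List.foldl_cons]
    rcases h with ⟨hp, hr, hrc, hc⟩ | ⟨k, runs0, hp, hc, hr, hrc⟩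
    · subst hp hr hrc hc
      rw [show fcrStepA min_repeats (PySem.Dict.empty, 1, none) x
            = (PySem.Dict.empty, 1, some (fcrTrack x)) by simp [fcrStepA, fcrFlush],
          show fcrRunStep [] x = [(fcrTrack x, 1)] by rw [fcrRunStep_eval]; rfl]
      exact ih _ _ _ _ (Or.inr ⟨fcrTrack x, [], rfl, le_refl 1, by simp, rfl⟩)
    · subst hp hr hrc
      by_cases ht : fcrTrack x = k
      · rw [show fcrStepA min_repeats (runs0.foldl (fcrBest min_repeats) PySem.Dict.empty, c, some k) x
              = (runs0.foldl (fcrBest min_repeats) PySem.Dict.empty, c + 1, some (fcrTrack x)) by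
            simp [fcrStepA, ht],
            show fcrRunStep (runs0 ++ [(k, c)]) x = runs0 ++ [(k, c + 1)] by
            rw [fcrRunStep_eval]; simp [ht, List.getLast?_concat]]
        exact ih _ _ _ _ (Or.inr ⟨fcrTrack x, runs0, rfl, by omega, by rw [ht], rfl⟩)
      · rw [show fcrStepA min_repeats (runs0.foldl (fcrBest min_repeats) PySem.Dict.empty, c, some k) x
              = (fcrFlush min_repeats (runs0.foldl (fcrBest min_repeats) PySem.Dict.empty) c (some k),
                 1, some (fcrTrack x)) by
            simp only [fcrStepA]; rw [if_neg (by simp [ht])],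
            show fcrRunStep (runs0 ++ [(k, c)]) x = (runs0 ++ [(k, c)]) ++ [(fcrTrack x, 1)] by
            rw [fcrRunStep_eval]; simp only [List.getLast?_concat]
            rw [if_neg (by simpa using fun h => ht h.symm)]]
        refine ih _ _ _ _ (Or.inr ⟨fcrTrack x, runs0 ++ [(k, c)], rfl, le_refl 1, rfl, ?_⟩)
        rw [List.foldl_append, List.foldl_cons, List.foldl_nil]
        exact fcr_flush_eq_best min_repeats _ c k hc
          (fcr_nodup_keys_foldl_best min_repeats runs0 _ PySem.Dict.nodup_keys_empty)

-- ===== VERDICT (by name: the statement is the Claim_ definition above) =====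
theorem find_consecutive_repeats_spec : Claim_equal_find_consecutive_repeats := by
  intro scrobbles min_repeats _ _
  unfold Spec_find_consecutive_repeats find_consecutive_repeats find_consecutive_repeats_alt
  rw [fcrRuns_eq]
  exact congrArg (fun d => PySem.List.sorted d.items (fun x => x.2) true)
    (fcr_main min_repeats scrobbles PySem.Dict.empty 1 none [] (Or.inl ⟨rfl, rfl, rfl, rfl⟩))
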